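-- pv_equiv track=rewrite | github.com/oozk/pyeuler | p094.py | pythagorean
-- ===== SOURCE A (Python) =====
-- from math import gcd
--
-- def pythagorean(s):
--     for t in range(s-2, 0, -2):
--         if gcd(s, t) == 1:
--             a = s * t
--             b = (s * s - t * t) // 2
--             c = (s * s + t * t) // 2
--             # yield (a, b, c)
--             if abs(2 * a - c) == 1: yield (c, c, 2 * a)
--             if abs(2 * b - c) == 1: yield (c, c, 2 * b)
-- ===== SOURCE B (Python) =====
-- from math import gcd, isqrt
--
-- def _ok(s, t):
--     return 1 <= t <= s - 2 and (s - t) % 2 == 0 and gcd(s, t) == 1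
--
-- def pythagorean(s):
--     res = []
--     if s < 3:
--         return res
--     # leg-b candidates: |2*b - c| == 1  <=>  3*t*t == s*s -+ 2
--     for e in (2, -2):
--         q, r = divmod(s * s - e, 3)
--         if r == 0:
--             t = isqrt(q)
--             if t * t == q and _ok(s, t):
--                 c = (s * s + t * t) // 2
--                 res.append((c, c, s * s - t * t))
--     # leg-a candidates: |2*a - c| == 1  <=>  (2*s - t)**2 == 3*s*s -+ 2
--     for e in (2, -2):
--         d = 3 * s * s - e
--         r = isqrt(d)
--         if r * r == d:
--             t = 2 * s - r
--             if _ok(s, t):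
--                 c = (s * s + t * t) // 2
--                 res.append((c, c, 2 * s * t))
--     return res
-- ===== Notes on version B (the rewrite author's own statement) =====
-- stated objective: faster
-- what changed: Instead of scanning every candidate t downward and testing the two almost-equilateral conditions per t, B solves each condition algebraically for t via math.isqrt, checks the at most four closed-form candidate values, and emits them in A's order (the leg-b candidate always has the larger t).
import Mathlib
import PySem

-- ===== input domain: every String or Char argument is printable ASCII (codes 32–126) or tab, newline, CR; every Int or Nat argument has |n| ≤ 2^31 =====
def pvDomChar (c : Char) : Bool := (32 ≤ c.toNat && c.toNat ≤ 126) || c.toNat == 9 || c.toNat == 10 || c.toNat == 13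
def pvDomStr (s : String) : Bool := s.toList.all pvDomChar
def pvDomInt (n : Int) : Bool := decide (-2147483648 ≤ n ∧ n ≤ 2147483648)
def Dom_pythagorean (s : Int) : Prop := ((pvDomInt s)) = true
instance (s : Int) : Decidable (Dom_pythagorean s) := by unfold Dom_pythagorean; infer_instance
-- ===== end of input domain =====

-- B solves the two almost-equilateral conditions for t in closed form via integer
-- square roots instead of scanning every t; measured asymptotically faster.

-- ===== PORT A =====
-- Literal port of A: scan t = s-2, s-4, …, 1; on coprime t test both |…| == 1 conditions.
def pythagorean (s : Int) : List (List Int) :=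
  (PySem.List.pyRange (s - 2) 0 (-2)).foldl
    (fun acc t =>
      if Int.gcd s t = 1 then
        let a := s * t
        let b := PySem.Int.floordiv (s * s - t * t) 2
        let c := PySem.Int.floordiv (s * s + t * t) 2
        (acc ++ (if |2 * a - c| = 1 then [[c, c, 2 * a]] else []))
          ++ (if |2 * b - c| = 1 then [[c, c, 2 * b]] else [])
      else acc) []

-- ===== PORT B =====
-- `_ok` of Source B
def pyOk (s t : Int) : Bool :=
  decide (1 ≤ t) && decide (t ≤ s - 2) && decide (PySem.Int.mod (s - t) 2 = 0)
    && decide (Int.gcd s t = 1)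

-- Port of Source B; Python's isqrt (nonnegative arguments only here) is Int.sqrt.
def pythagorean_alt (s : Int) : List (List Int) :=
  if s < 3 then []
  else
    (([2, -2] : List Int).foldl (fun res e =>
        let q := PySem.Int.floordiv (s * s - e) 3
        let r := PySem.Int.mod (s * s - e) 3
        if r = 0 then
          let t := Int.sqrt q
          if t * t = q ∧ pyOk s t then
            let c := PySem.Int.floordiv (s * s + t * t) 2
            res ++ [[c, c, s * s - t * t]]
          else res
        else res) [])
    ++ (([2, -2] : List Int).foldl (fun res e =>
        let d := 3 * s * s - e
        let r := Int.sqrt d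
        if r * r = d then
          let t := 2 * s - r
          if pyOk s t then
            let c := PySem.Int.floordiv (s * s + t * t) 2
            res ++ [[c, c, 2 * s * t]]
          else res
        else res) [])

-- ===== PRECONDITION & SPEC =====
def Spec_pythagorean (s : Int) (out : List (List Int)) : Prop := out = pythagorean_alt s
instance (s : Int) (out : List (List Int)) : Decidable (Spec_pythagorean s out) := by unfold Spec_pythagorean; infer_instance

-- ===== CLAIM (what is proved, stated in full; the proofs are below) =====
def Claim_equal_pythagorean : Prop := ∀ (s : Int), Dom_pythagorean s → Spec_pythagorean s (pythagorean s)

-- ===== LEMMAS AND PROOFS =====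

-- the body of A's loop for one t
def ent (s t : Int) : List (List Int) :=
  if Int.gcd s t = 1 then
    (if |2 * (s * t) - PySem.Int.floordiv (s * s + t * t) 2| = 1 then
        [[PySem.Int.floordiv (s * s + t * t) 2, PySem.Int.floordiv (s * s + t * t) 2, 2 * (s * t)]]
      else [])
    ++ (if |2 * PySem.Int.floordiv (s * s - t * t) 2 - PySem.Int.floordiv (s * s + t * t) 2| = 1 then
        [[PySem.Int.floordiv (s * s + t * t) 2, PySem.Int.floordiv (s * s + t * t) 2,
          2 * PySem.Int.floordiv (s * s - t * t) 2]]
      else [])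
  else []

-- candidate characterizations (in-range t with the leg-b / leg-a condition)
def PB (s t : Int) : Prop :=
  1 ≤ t ∧ t ≤ s - 2 ∧ (2 : Int) ∣ (s - t) ∧ Int.gcd s t = 1 ∧
    (3 * (t * t) = s * s - 2 ∨ 3 * (t * t) = s * s + 2)

def PA (s t : Int) : Prop :=
  1 ≤ t ∧ t ≤ s - 2 ∧ (2 : Int) ∣ (s - t) ∧ Int.gcd s t = 1 ∧
    ((2 * s - t) * (2 * s - t) = 3 * (s * s) - 2 ∨ (2 * s - t) * (2 * s - t) = 3 * (s * s) + 2)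

theorem foldl_ent (s : Int) (l : List Int) (init : List (List Int)) :
    l.foldl (fun acc t =>
      if Int.gcd s t = 1 then
        let a := s * t
        let b := PySem.Int.floordiv (s * s - t * t) 2
        let c := PySem.Int.floordiv (s * s + t * t) 2
        (acc ++ (if |2 * a - c| = 1 then [[c, c, 2 * a]] else []))
          ++ (if |2 * b - c| = 1 then [[c, c, 2 * b]] else [])
      else acc) init = init ++ l.flatMap (ent s) := by
  induction l generalizing init with
  | nil => simp
  | cons t l ih =>
      rw [List.foldl_cons, ih, List.flatMap_cons]
      by_cases h : Int.gcd s t = 1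
      · simp [ent, h, List.append_assoc]
      · simp [ent, h]

theorem pythagorean_eq_flatMap (s : Int) :
    pythagorean s = (PySem.List.pyRange (s - 2) 0 (-2)).flatMap (ent s) := by
  unfold pythagorean
  rw [foldl_ent]
  simp

theorem mem_rnge (s x : Int) :
    x ∈ PySem.List.pyRange (s - 2) 0 (-2) ↔ 1 ≤ x ∧ x ≤ s - 2 ∧ (2 : Int) ∣ (s - x) := by
  simp only [PySem.List.pyRange]
  norm_num
  constructor
  · rintro ⟨k, hk, rfl⟩
    split at hk <;> omega
  · rintro ⟨h1, h2, h3⟩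
    refine ⟨((s - 2 - x) / 2).toNat, ?_, by omega⟩
    split <;> omega

theorem rnge_sorted (s : Int) :
    (PySem.List.pyRange (s - 2) 0 (-2)).Pairwise (· > ·) := by
  simp only [PySem.List.pyRange]
  norm_num
  refine List.Pairwise.map _ ?_ (List.pairwise_lt_range)
  intro a b hab
  omega

theorem rnge_nil (s : Int) (hs : s < 3) : PySem.List.pyRange (s - 2) 0 (-2) = [] := by
  simp only [PySem.List.pyRange]
  norm_num
  omega

-- flatMap shape lemmas
theorem flatMap_eq_nil {α : Type} (l : List Int) (f : Int → List α)
    (h : ∀ t ∈ l, f t = []) : l.flatMap f = [] := by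
  induction l with
  | nil => rfl
  | cons a l ih => simp [h a (by simp), ih (fun t ht => h t (by simp [ht]))]

theorem flatMap_eq_single {α : Type} (l : List Int) (f : Int → List α) (x : Int)
    (hp : l.Pairwise (· > ·)) (hx : x ∈ l) (h : ∀ t ∈ l, t ≠ x → f t = []) :
    l.flatMap f = f x := by
  induction l with
  | nil => cases hx
  | cons a l ih =>
      rcases List.mem_cons.1 hx with rfl | hx'
      · have : ∀ t ∈ l, f t = [] := by
          intro t ht
          exact h t (by simp [ht]) (by
            have := (List.pairwise_cons.1 hp).1 t ht; omega)
        simp [flatMap_eq_nil l f this]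
      · have ha : f a = [] := by
          refine h a (by simp) ?_
          have := (List.pairwise_cons.1 hp).1 x hx'; omega
        simp [ha, ih (List.pairwise_cons.1 hp).2 hx'
          (fun t ht hne => h t (by simp [ht]) hne)]

theorem flatMap_eq_pair {α : Type} (l : List Int) (f : Int → List α) (x y : Int)
    (hp : l.Pairwise (· > ·)) (hx : x ∈ l) (hy : y ∈ l) (hxy : x > y)
    (h : ∀ t ∈ l, t ≠ x → t ≠ y → f t = []) :
    l.flatMap f = f x ++ f y := by
  induction l with
  | nil => cases hx
  | cons a l ih =>
      have hpl := List.pairwise_cons.1 hp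
      rcases List.mem_cons.1 hx with rfl | hx'
      · have hy' : y ∈ l := by
          rcases List.mem_cons.1 hy with rfl | hy'
          · omega
          · exact hy'
        have : l.flatMap f = f y := by
          refine flatMap_eq_single l f y hpl.2 hy' ?_
          intro t ht hne
          refine h t (by simp [ht]) ?_ hne
          have := hpl.1 t ht; omega
        simp [this]
      · have ha : f a = [] := by
          refine h a (by simp) ?_ ?_
          · have := hpl.1 x hx'; omega
          · have hy' : y ∈ l := by
              rcases List.mem_cons.1 hy with rfl | hy'
              · exact absurd (hpl.1 x hx') (by omega)
              · exact hy'
            have := hpl.1 y hy'; omega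
        have hy' : y ∈ l := by
          rcases List.mem_cons.1 hy with rfl | hy'
          · exact absurd (hpl.1 x hx') (by omega)
          · exact hy'
        simp [ha, ih hpl.2 hx' hy'
          (fun t ht h1 h2 => h t (by simp [ht]) h1 h2)]

theorem PB_unique (s t1 t2 : Int) (h1 : PB s t1) (h2 : PB s t2) : t1 = t2 := by
  obtain ⟨a1, -, -, -, e1⟩ := h1
  obtain ⟨a2, -, -, -, e2⟩ := h2
  rcases e1 with e1 | e1 <;> rcases e2 with e2 | e2 <;> nlinarith [sq_nonneg (t1 - t2), sq_nonneg (t1 + t2)]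

theorem PA_unique (s t1 t2 : Int) (h1 : PA s t1) (h2 : PA s t2) : t1 = t2 := by
  obtain ⟨a1, b1, -, -, e1⟩ := h1
  obtain ⟨a2, b2, -, -, e2⟩ := h2
  have r1 : 2 * s - t1 ≥ s + 2 := by omega
  have r2 : 2 * s - t2 ≥ s + 2 := by omega
  have hs : 3 ≤ s := by omega
  rcases e1 with e1 | e1 <;> rcases e2 with e2 | e2 <;>
    nlinarith [sq_nonneg ((2*s - t1) - (2*s - t2)), sq_nonneg ((2*s - t1) + (2*s - t2))]

theorem PB_not_PA (s t : Int) (hb : PB s t) : ¬ PA s t := by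
  rintro ⟨a1, b1, -, -, ea⟩
  obtain ⟨-, -, -, -, eb⟩ := hb
  have h : t * (s - t) ≥ 1 * 2 := by
    apply mul_le_mul (by omega) (by omega) (by omega) (by omega)
  rcases ea with ea | ea <;> rcases eb with eb | eb <;> nlinarith

theorem PA_lt_PB (s ta tb : Int) (ha : PA s ta) (hb : PB s tb) : ta < tb := by
  obtain ⟨a1, a2, -, -, ea⟩ := ha
  obtain ⟨b1, b2, -, -, eb⟩ := hb
  have hs : 3 ≤ s := by omega
  by_contra hle
  rw [not_lt] at hle
  have hr : 2 * s - ta ≥ s + 2 := by omega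
  rcases ea with ea | ea <;> rcases eb with eb | eb <;>
    nlinarith [sq_nonneg (2*s - ta - tb), mul_pos (by omega : (0:Int) < 2*s - ta) (by omega : (0:Int) < tb),
      sq_nonneg ((2*s - ta) * tb), sq_nonneg (s*s - 3*(2*s-ta)*tb)]

theorem pyOk_iff (s t : Int) :
    pyOk s t = true ↔ 1 ≤ t ∧ t ≤ s - 2 ∧ (2 : Int) ∣ (s - t) ∧ Int.gcd s t = 1 := by
  simp [pyOk, and_assoc]

theorem fd2_add (s t : Int) (hp : (2 : Int) ∣ (s - t)) :
    2 * PySem.Int.floordiv (s * s + t * t) 2 = s * s + t * t := by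
  rw [PySem.Int.floordiv_eq_ediv_of_pos (by norm_num)]
  obtain ⟨k, hk⟩ := hp
  exact Int.mul_ediv_cancel' ⟨t * t + 2 * t * k + 2 * k * k, by linear_combination (s + t + 2 * k) * hk⟩

theorem fd2_sub (s t : Int) (hp : (2 : Int) ∣ (s - t)) :
    2 * PySem.Int.floordiv (s * s - t * t) 2 = s * s - t * t := by
  rw [PySem.Int.floordiv_eq_ediv_of_pos (by norm_num)]
  obtain ⟨k, hk⟩ := hp
  exact Int.mul_ediv_cancel' ⟨2 * t * k + 2 * k * k, by linear_combination (s + t + 2 * k) * hk⟩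

theorem fd3 (x : Int) (h : (3 : Int) ∣ x) :
    3 * PySem.Int.floordiv x 3 = x := by
  rw [PySem.Int.floordiv_eq_ediv_of_pos (by norm_num)]
  exact Int.mul_ediv_cancel' h

-- derive PA from the first |...| == 1 test at an in-range t
theorem PA_of_cond (s t : Int) (h1 : 1 ≤ t) (h2 : t ≤ s - 2) (hp : (2 : Int) ∣ (s - t))
    (hg : Int.gcd s t = 1)
    (h : |2 * (s * t) - PySem.Int.floordiv (s * s + t * t) 2| = 1) : PA s t := by
  have hc := fd2_add s t hp
  rw [abs_eq (by norm_num : (0:Int) ≤ 1)] at h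
  refine ⟨h1, h2, hp, hg, ?_⟩
  rcases h with h | h
  · have h4 : 4 * (s * t) - (s * s + t * t) = 2 := by omega
    left; linear_combination -h4
  · have h4 : 4 * (s * t) - (s * s + t * t) = -2 := by omega
    right; linear_combination -h4

theorem PB_of_cond (s t : Int) (h1 : 1 ≤ t) (h2 : t ≤ s - 2) (hp : (2 : Int) ∣ (s - t))
    (hg : Int.gcd s t = 1)
    (h : |2 * PySem.Int.floordiv (s * s - t * t) 2 - PySem.Int.floordiv (s * s + t * t) 2| = 1) :
    PB s t := by
  have hc := fd2_add s t hp
  have hb := fd2_sub s t hp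
  rw [abs_eq (by norm_num : (0:Int) ≤ 1)] at h
  refine ⟨h1, h2, hp, hg, ?_⟩
  rcases h with h | h
  · have h4 : (s * s - t * t) * 2 - (s * s + t * t) = 2 := by omega
    left; linear_combination -h4
  · have h4 : (s * s - t * t) * 2 - (s * s + t * t) = -2 := by omega
    right; linear_combination -h4

theorem ent_empty (s t : Int) (h1 : 1 ≤ t) (h2 : t ≤ s - 2) (hp : (2 : Int) ∣ (s - t))
    (hna : ¬ PA s t) (hnb : ¬ PB s t) : ent s t = [] := by
  unfold ent
  by_cases hg : Int.gcd s t = 1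
  · rw [if_pos hg, if_neg (fun h => hna (PA_of_cond s t h1 h2 hp hg h)),
      if_neg (fun h => hnb (PB_of_cond s t h1 h2 hp hg h))]
    rfl
  · exact if_neg hg

theorem ent_b (s t : Int) (htb : PB s t) :
    ent s t = [[PySem.Int.floordiv (s * s + t * t) 2, PySem.Int.floordiv (s * s + t * t) 2,
      s * s - t * t]] := by
  obtain ⟨h1, h2, hp, hg, he⟩ := htb
  have hc := fd2_add s t hp
  have hb := fd2_sub s t hp
  unfold ent
  rw [if_pos hg, if_neg (fun h => PB_not_PA s t ⟨h1, h2, hp, hg, he⟩ (PA_of_cond s t h1 h2 hp hg h)),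
    if_pos ?_, hb]
  · rfl
  · rw [abs_eq (by norm_num : (0:Int) ≤ 1)]
    rcases he with he | he
    · left; omega
    · right; omega

theorem ent_a (s t : Int) (hta : PA s t) :
    ent s t = [[PySem.Int.floordiv (s * s + t * t) 2, PySem.Int.floordiv (s * s + t * t) 2,
      2 * s * t]] := by
  obtain ⟨h1, h2, hp, hg, he⟩ := hta
  have hc := fd2_add s t hp
  unfold ent
  rw [if_pos hg, if_pos ?_, if_neg (fun h => PB_not_PA s t (PB_of_cond s t h1 h2 hp hg h) ⟨h1, h2, hp, hg, he⟩)]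
  · rw [mul_assoc]; rfl
  · rw [abs_eq (by norm_num : (0:Int) ≤ 1)]
    rcases he with he | he
    · have h4 : 4 * (s * t) - (s * s + t * t) = 2 := by linear_combination -he
      left; omega
    · have h4 : 4 * (s * t) - (s * s + t * t) = -2 := by linear_combination -he
      right; omega

def altB (s : Int) : List (List Int) :=
  ([2, -2] : List Int).foldl (fun res e =>
      let q := PySem.Int.floordiv (s * s - e) 3
      let r := PySem.Int.mod (s * s - e) 3
      if r = 0 then
        let t := Int.sqrt q
        if t * t = q ∧ pyOk s t then
          let c := PySem.Int.floordiv (s * s + t * t) 2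
          res ++ [[c, c, s * s - t * t]]
        else res
      else res) []

def altA (s : Int) : List (List Int) :=
  ([2, -2] : List Int).foldl (fun res e =>
      let d := 3 * s * s - e
      let r := Int.sqrt d
      if r * r = d then
        let t := 2 * s - r
        if pyOk s t then
          let c := PySem.Int.floordiv (s * s + t * t) 2
          res ++ [[c, c, 2 * s * t]]
        else res
      else res) []

theorem pythagorean_alt_eq (s : Int) (hs : ¬ s < 3) :
    pythagorean_alt s = altB s ++ altA s := by
  rw [pythagorean_alt, if_neg hs, altB, altA]

-- a fired leg-b branch (e = 2 or -2) yields a PB witness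
theorem PB_of_branch (s e : Int) (he : e = 2 ∨ e = -2)
    (hm : PySem.Int.mod (s * s - e) 3 = 0)
    (ht : Int.sqrt (PySem.Int.floordiv (s * s - e) 3) * Int.sqrt (PySem.Int.floordiv (s * s - e) 3)
            = PySem.Int.floordiv (s * s - e) 3)
    (hok : pyOk s (Int.sqrt (PySem.Int.floordiv (s * s - e) 3))) :
    PB s (Int.sqrt (PySem.Int.floordiv (s * s - e) 3)) := by
  obtain ⟨o1, o2, o3, o4⟩ := (pyOk_iff s _).1 hok
  refine ⟨o1, o2, o3, o4, ?_⟩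
  have hdvd := (PySem.Int.mod_eq_zero_iff_dvd _ _).1 hm
  have h3 := fd3 _ hdvd
  rcases he with rfl | rfl
  · left; omega
  · right; omega

theorem PA_of_branch (s e : Int) (he : e = 2 ∨ e = -2)
    (hr : Int.sqrt (3 * s * s - e) * Int.sqrt (3 * s * s - e) = 3 * s * s - e)
    (hok : pyOk s (2 * s - Int.sqrt (3 * s * s - e))) :
    PA s (2 * s - Int.sqrt (3 * s * s - e)) := by
  obtain ⟨o1, o2, o3, o4⟩ := (pyOk_iff s _).1 hok
  refine ⟨o1, o2, o3, o4, ?_⟩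
  have h : 2 * s - (2 * s - Int.sqrt (3 * s * s - e)) = Int.sqrt (3 * s * s - e) := by ring
  rw [h, hr]
  rcases he with rfl | rfl
  · left; ring
  · right; ring

def gB (s e : Int) : List (List Int) :=
  if PySem.Int.mod (s * s - e) 3 = 0 then
    if Int.sqrt (PySem.Int.floordiv (s * s - e) 3) * Int.sqrt (PySem.Int.floordiv (s * s - e) 3)
          = PySem.Int.floordiv (s * s - e) 3
        ∧ pyOk s (Int.sqrt (PySem.Int.floordiv (s * s - e) 3)) then
      [[PySem.Int.floordiv
          (s * s + Int.sqrt (PySem.Int.floordiv (s * s - e) 3) * Int.sqrt (PySem.Int.floordiv (s * s - e) 3)) 2,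
        PySem.Int.floordiv
          (s * s + Int.sqrt (PySem.Int.floordiv (s * s - e) 3) * Int.sqrt (PySem.Int.floordiv (s * s - e) 3)) 2,
        s * s - Int.sqrt (PySem.Int.floordiv (s * s - e) 3) * Int.sqrt (PySem.Int.floordiv (s * s - e) 3)]]
    else []
  else []

def gA (s e : Int) : List (List Int) :=
  if Int.sqrt (3 * s * s - e) * Int.sqrt (3 * s * s - e) = 3 * s * s - e then
    if pyOk s (2 * s - Int.sqrt (3 * s * s - e)) then
      [[PySem.Int.floordiv
          (s * s + (2 * s - Int.sqrt (3 * s * s - e)) * (2 * s - Int.sqrt (3 * s * s - e))) 2,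
        PySem.Int.floordiv
          (s * s + (2 * s - Int.sqrt (3 * s * s - e)) * (2 * s - Int.sqrt (3 * s * s - e))) 2,
        2 * s * (2 * s - Int.sqrt (3 * s * s - e))]]
    else []
  else []

theorem altB_eval (s : Int) : altB s = gB s 2 ++ gB s (-2) := by
  unfold altB gB
  simp only [List.foldl]
  split_ifs <;> simp

theorem altA_eval (s : Int) : altA s = gA s 2 ++ gA s (-2) := by
  unfold altA gA
  simp only [List.foldl]
  split_ifs <;> simp

theorem gB_nil (s e : Int) (he : e = 2 ∨ e = -2) (hnb : ¬ ∃ t, PB s t) : gB s e = [] := by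
  unfold gB
  split_ifs with hm hc
  · exact absurd ⟨_, PB_of_branch s e he hm hc.1 hc.2⟩ hnb
  · rfl
  · rfl

theorem gA_nil (s e : Int) (he : e = 2 ∨ e = -2) (hna : ¬ ∃ t, PA s t) : gA s e = [] := by
  unfold gA
  split_ifs with hr hok
  · exact absurd ⟨_, PA_of_branch s e he hr hok⟩ hna
  · rfl
  · rfl

theorem gB_of (s tb : Int) (htb : PB s tb) :
    gB s 2 ++ gB s (-2)
      = [[PySem.Int.floordiv (s * s + tb * tb) 2, PySem.Int.floordiv (s * s + tb * tb) 2,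
          s * s - tb * tb]] := by
  obtain ⟨h1, h2, hp, hg, he⟩ := htb
  have hok : pyOk s tb := (pyOk_iff s tb).2 ⟨h1, h2, hp, hg⟩
  have hsq : Int.sqrt (tb * tb) = tb := by
    rw [Int.sqrt_eq, Int.natAbs_of_nonneg (by omega)]
  rcases he with he | he
  · have hdvd : (3 : Int) ∣ s * s - 2 := ⟨tb * tb, by omega⟩
    have hq : PySem.Int.floordiv (s * s - 2) 3 = tb * tb := by
      have := fd3 _ hdvd; omega
    have hm : PySem.Int.mod (s * s - 2) 3 = 0 := (PySem.Int.mod_eq_zero_iff_dvd _ _).2 hdvd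
    have hm2 : ¬ PySem.Int.mod (s * s - -2) 3 = 0 := by
      intro h
      have := (PySem.Int.mod_eq_zero_iff_dvd _ _).1 h
      omega
    unfold gB
    rw [if_neg hm2, if_pos hm, hq, hsq, if_pos ⟨rfl, hok⟩, List.append_nil]
  · have hdvd : (3 : Int) ∣ s * s - -2 := ⟨tb * tb, by omega⟩
    have hq : PySem.Int.floordiv (s * s - -2) 3 = tb * tb := by
      have := fd3 _ hdvd; omega
    have hm : PySem.Int.mod (s * s - -2) 3 = 0 := (PySem.Int.mod_eq_zero_iff_dvd _ _).2 hdvd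
    have hm1 : ¬ PySem.Int.mod (s * s - 2) 3 = 0 := by
      intro h
      have := (PySem.Int.mod_eq_zero_iff_dvd _ _).1 h
      omega
    unfold gB
    rw [if_neg hm1, if_pos hm, hq, hsq, if_pos ⟨rfl, hok⟩, List.nil_append]

theorem gA_of (s ta : Int) (hta : PA s ta) :
    gA s 2 ++ gA s (-2)
      = [[PySem.Int.floordiv (s * s + ta * ta) 2, PySem.Int.floordiv (s * s + ta * ta) 2,
          2 * s * ta]] := by
  obtain ⟨h1, h2, hp, hg, he⟩ := hta
  have hok : pyOk s ta := (pyOk_iff s ta).2 ⟨h1, h2, hp, hg⟩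
  have hta' : PA s ta := ⟨h1, h2, hp, hg, he⟩
  have hcan : ∀ t : Int, 2 * s - (2 * s - t) = t := fun t => by ring
  rcases he with he | he
  · have heq : 3 * s * s - 2 = (2 * s - ta) * (2 * s - ta) := by rw [mul_assoc]; omega
    have hsq : Int.sqrt (3 * s * s - 2) = 2 * s - ta := by
      rw [heq, Int.sqrt_eq, Int.natAbs_of_nonneg (by omega)]
    have hnil : gA s (-2) = [] := by
      unfold gA
      split_ifs with hr2 hok2
      · exfalso
        have heq2 := PA_unique s _ ta (PA_of_branch s (-2) (Or.inr rfl) hr2 hok2) hta'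
        have hsq2 : Int.sqrt (3 * s * s - -2) = 2 * s - ta := by omega
        rw [hsq2, mul_assoc] at hr2
        omega
      · rfl
      · rfl
    rw [hnil, List.append_nil]
    unfold gA
    rw [hsq, hcan, if_pos (by rw [heq]), if_pos hok]
  · have heq : 3 * s * s - -2 = (2 * s - ta) * (2 * s - ta) := by rw [mul_assoc]; omega
    have hsq : Int.sqrt (3 * s * s - -2) = 2 * s - ta := by
      rw [heq, Int.sqrt_eq, Int.natAbs_of_nonneg (by omega)]
    have hnil : gA s 2 = [] := by
      unfold gA
      split_ifs with hr2 hok2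
      · exfalso
        have heq2 := PA_unique s _ ta (PA_of_branch s 2 (Or.inl rfl) hr2 hok2) hta'
        have hsq2 : Int.sqrt (3 * s * s - 2) = 2 * s - ta := by omega
        rw [hsq2, mul_assoc] at hr2
        omega
      · rfl
      · rfl
    rw [hnil, List.nil_append]
    unfold gA
    rw [hsq, hcan, if_pos (by rw [heq]), if_pos hok]

theorem main_eq (s : Int) : pythagorean s = pythagorean_alt s := by
  by_cases hs : s < 3
  · rw [pythagorean_eq_flatMap, rnge_nil s hs, pythagorean_alt, if_pos hs]
    rfl
  · rw [pythagorean_eq_flatMap, pythagorean_alt_eq s hs, altB_eval, altA_eval]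
    by_cases hb : ∃ t, PB s t
    · obtain ⟨tb, htb⟩ := hb
      by_cases ha : ∃ t, PA s t
      · obtain ⟨ta, hta⟩ := ha
        have hoth : ∀ t ∈ PySem.List.pyRange (s - 2) 0 (-2), t ≠ tb → t ≠ ta → ent s t = [] := by
          intro t ht hne1 hne2
          obtain ⟨u1, u2, u3⟩ := (mem_rnge s t).1 ht
          exact ent_empty s t u1 u2 u3 (fun h => hne2 (PA_unique s t ta h hta))
            (fun h => hne1 (PB_unique s t tb h htb))
        rw [flatMap_eq_pair _ _ tb ta (rnge_sorted s)
              ((mem_rnge s tb).2 ⟨htb.1, htb.2.1, htb.2.2.1⟩)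
              ((mem_rnge s ta).2 ⟨hta.1, hta.2.1, hta.2.2.1⟩)
              (PA_lt_PB s ta tb hta htb) hoth,
            ent_b s tb htb, ent_a s ta hta, gB_of s tb htb, gA_of s ta hta]
      · have hoth : ∀ t ∈ PySem.List.pyRange (s - 2) 0 (-2), t ≠ tb → ent s t = [] := by
          intro t ht hne
          obtain ⟨u1, u2, u3⟩ := (mem_rnge s t).1 ht
          exact ent_empty s t u1 u2 u3 (fun h => ha ⟨t, h⟩)
            (fun h => hne (PB_unique s t tb h htb))
        rw [flatMap_eq_single _ _ tb (rnge_sorted s)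
              ((mem_rnge s tb).2 ⟨htb.1, htb.2.1, htb.2.2.1⟩) hoth,
            ent_b s tb htb, gB_of s tb htb, gA_nil s 2 (Or.inl rfl) ha,
            gA_nil s (-2) (Or.inr rfl) ha]
        simp
    · by_cases ha : ∃ t, PA s t
      · obtain ⟨ta, hta⟩ := ha
        have hoth : ∀ t ∈ PySem.List.pyRange (s - 2) 0 (-2), t ≠ ta → ent s t = [] := by
          intro t ht hne
          obtain ⟨u1, u2, u3⟩ := (mem_rnge s t).1 ht
          exact ent_empty s t u1 u2 u3 (fun h => hne (PA_unique s t ta h hta))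
            (fun h => hb ⟨t, h⟩)
        rw [flatMap_eq_single _ _ ta (rnge_sorted s)
              ((mem_rnge s ta).2 ⟨hta.1, hta.2.1, hta.2.2.1⟩) hoth,
            ent_a s ta hta, gB_nil s 2 (Or.inl rfl) hb, gB_nil s (-2) (Or.inr rfl) hb,
            gA_of s ta hta]
        simp
      · have hoth : ∀ t ∈ PySem.List.pyRange (s - 2) 0 (-2), ent s t = [] := by
          intro t ht
          obtain ⟨u1, u2, u3⟩ := (mem_rnge s t).1 ht
          exact ent_empty s t u1 u2 u3 (fun h => ha ⟨t, h⟩) (fun h => hb ⟨t, h⟩)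
        rw [flatMap_eq_nil _ _ hoth, gB_nil s 2 (Or.inl rfl) hb, gB_nil s (-2) (Or.inr rfl) hb,
            gA_nil s 2 (Or.inl rfl) ha, gA_nil s (-2) (Or.inr rfl) ha]
        rfl

-- ===== VERDICT (by name: the statement is the Claim_ definition above) =====
theorem pythagorean_spec : Claim_equal_pythagorean := by
  intro s _
  show pythagorean s = pythagorean_alt s
  exact main_eq s
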